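-- pv_equiv track=rewrite | github.com/Ledvin25/Personal | TEC/Tareas/tarea 4_Ledvin_Manuel_Leiva_Mata.py | determinar_orden
-- ===== SOURCE A (Python) =====
-- def determinar_orden(n):
--     i = 0
--     d2 = n%10
--     result = result1 = 0
--
--     while n > 0:
--         d1 = n%10
--         n = n//10
--
--         if d1 > d2:
--             result = 2
--         elif d1 < d2:
--             result = 1
--
--         if result != result1 and result1 != 0:
--             result = 0
--             break
--         d2 = d1
--         result1 = result
--
--     return result
-- ===== SOURCE B (Python) =====
-- def determinar_orden(n):
--     if n < 0:
--         return 0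
--     s = str(n)
--     has_up = has_down = False
--     for a, b in zip(s, s[1:]):
--         if a < b:
--             has_up = True
--         elif a > b:
--             has_down = True
--     if has_up and has_down:
--         return 0
--     if has_up:
--         return 1
--     if has_down:
--         return 2
--     return 0
-- ===== Notes on version B (the rewrite author's own statement) =====
-- stated objective: simpler
-- what changed: Replaces A's mutable result/result1 state machine with early break over modular digit extraction by a stateless scan of str(n): two monotonicity flags accumulated over adjacent character pairs and a final four-way table lookup.
import Mathlib
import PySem

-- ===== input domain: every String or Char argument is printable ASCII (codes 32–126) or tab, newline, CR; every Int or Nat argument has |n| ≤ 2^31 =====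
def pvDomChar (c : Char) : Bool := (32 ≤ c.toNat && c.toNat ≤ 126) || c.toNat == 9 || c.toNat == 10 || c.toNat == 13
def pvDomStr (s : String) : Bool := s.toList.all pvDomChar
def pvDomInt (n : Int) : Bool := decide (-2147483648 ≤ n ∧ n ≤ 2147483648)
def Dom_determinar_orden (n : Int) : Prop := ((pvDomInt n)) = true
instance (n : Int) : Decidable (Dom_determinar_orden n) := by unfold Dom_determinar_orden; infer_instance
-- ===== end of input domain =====

-- B replaces A's result/result1 state machine (early break, modular digit extraction)
-- by a stateless scan of str(n) keeping two monotonicity flags; objective: simpler.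

-- ===== PORT A =====
-- the while loop of A: state (n, d2, result, result1)
def detLoopA (n d2 result result1 : Int) : Int :=
  if h : n > 0 then
    let d1 := PySem.Int.mod n 10
    let n' := PySem.Int.floordiv n 10
    let r := if d1 > d2 then 2 else if d1 < d2 then 1 else result
    if r ≠ result1 ∧ result1 ≠ 0 then 0
    else detLoopA n' d1 r r
  else result
termination_by n.toNat
decreasing_by
  rw [PySem.Int.floordiv_eq_ediv_of_pos (by norm_num)]
  omega

def determinar_orden (n : Int) : Int :=
  detLoopA n (PySem.Int.mod n 10) 0 0

-- ===== PORT B =====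
-- the for loop of B: flags (has_up, has_down) over the zipped pairs
def altFlags (ps : List (Char × Char)) : Bool × Bool :=
  ps.foldl (fun fl ab =>
    if ab.1 < ab.2 then (true, fl.2)
    else if ab.1 > ab.2 then (fl.1, true)
    else fl) (false, false)

def determinar_orden_alt (n : Int) : Int :=
  if n < 0 then 0
  else
    let s := (PySem.Int.toStr n).toList       -- str(n), as its characters
    let fl := altFlags (s.zip (s.drop 1))     -- zip(s, s[1:])
    if fl.1 && fl.2 then 0
    else if fl.1 then 1
    else if fl.2 then 2
    else 0

-- ===== PRECONDITION & SPEC =====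
def Spec_determinar_orden (n : Int) (out : Int) : Prop := out = determinar_orden_alt n
instance (n : Int) (out : Int) : Decidable (Spec_determinar_orden n out) := by unfold Spec_determinar_orden; infer_instance

-- ===== CLAIM (what is proved, stated in full; the proofs are below) =====
def Claim_equal_determinar_orden : Prop := ∀ (n : Int), Dom_determinar_orden n → Spec_determinar_orden n (determinar_orden n)

-- ===== LEMMAS AND PROOFS =====

-- adjacent pairs of a list
def pairs {α : Type} (l : List α) : List (α × α) := l.zip (l.drop 1)

-- A's loop, re-expressed over the little-endian digit list (state r = result = result1)
def goA : List Int → Int → Int → Int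
  | [], _, r => r
  | d1 :: t, d2, r =>
    let r' := if d1 > d2 then 2 else if d1 < d2 then 1 else r
    if r' ≠ r ∧ r ≠ 0 then 0 else goA t d1 r'

-- "some later digit strictly below its predecessor" (fires the result := 1 branch)
def hU : Int → List Int → Bool
  | _, [] => false
  | d2, d1 :: t => (d1 < d2) || hU d1 t

-- "some later digit strictly above its predecessor" (fires the result := 2 branch)
def hD : Int → List Int → Bool
  | _, [] => false
  | d2, d1 :: t => (d2 < d1) || hD d1 t

lemma goA_one : ∀ (L : List Int) (d2 : Int), goA L d2 1 = if hD d2 L then 0 else 1 := by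
  intro L
  induction L with
  | nil => intro d2; simp [goA, hD]
  | cons d1 t ih =>
    intro d2
    by_cases h1 : d2 < d1
    · have h2 : ¬ d1 < d2 := by omega
      simp [goA, hD, h1]
    · by_cases h2 : d1 < d2
      · simp [goA, hD, h1, h2, ih]
      · simp [goA, hD, h1, h2, ih]

lemma goA_two : ∀ (L : List Int) (d2 : Int), goA L d2 2 = if hU d2 L then 0 else 2 := by
  intro L
  induction L with
  | nil => intro d2; simp [goA, hU]
  | cons d1 t ih =>
    intro d2
    by_cases h2 : d1 < d2
    · have h1 : ¬ d2 < d1 := by omega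
      simp [goA, hU, h1, h2]
    · by_cases h1 : d2 < d1
      · simp [goA, hU, h1, h2, ih]
      · simp [goA, hU, h1, h2, ih]

lemma goA_zero : ∀ (L : List Int) (d2 : Int),
    goA L d2 0 =
      if hU d2 L && hD d2 L then 0
      else if hU d2 L then 1
      else if hD d2 L then 2
      else 0 := by
  intro L
  induction L with
  | nil => intro d2; simp [goA, hU, hD]
  | cons d1 t ih =>
    intro d2
    by_cases h1 : d2 < d1
    · have h2 : ¬ d1 < d2 := by omega
      simp only [goA, hU, hD, h1, h2]
      simp [goA_two]
      by_cases hu : hU d1 t <;> simp [hu]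
    · by_cases h2 : d1 < d2
      · simp only [goA, hU, hD, h1, h2]
        simp [goA_one]
      · simp only [goA, hU, hD, h1, h2]
        simp [ih]

-- A's loop equals goA on the little-endian digit list
lemma detLoopA_eq_goA (m : Nat) : ∀ (d2 r : Int),
    detLoopA (m : Int) d2 r r = goA ((Nat.digits 10 m).map (Nat.cast : Nat → Int)) d2 r := by
  induction m using Nat.strong_induction_on with
  | _ m ih =>
    intro d2 r
    by_cases hm : 0 < m
    · rw [detLoopA]
      have hpos : (0:Int) < (m:Int) := by exact_mod_cast hm
      rw [dif_pos hpos]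
      rw [Nat.digits_def' (by norm_num : 1 < 10) hm]
      have hmod : PySem.Int.mod (m : Int) 10 = ((m % 10 : Nat) : Int) := by
        exact_mod_cast PySem.Int.mod_natCast m 10
      have hdiv : PySem.Int.floordiv (m : Int) 10 = ((m / 10 : Nat) : Int) := by
        exact_mod_cast PySem.Int.floordiv_natCast m 10
      rw [hmod, hdiv]
      simp only [List.map_cons, goA]
      have ihd := ih (m / 10) (Nat.div_lt_self hm (by norm_num))
      split_ifs <;> first | rfl | exact ihd _ _
    · have hm0 : m = 0 := by omega
      subst hm0
      rw [detLoopA]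
      simp [goA]

-- hU/hD as an `any` over adjacent pairs
lemma hU_eq_any : ∀ (L : List Int) (d2 : Int),
    hU d2 L = (pairs (d2 :: L)).any (fun p => p.2 < p.1) := by
  intro L
  induction L with
  | nil => intro d2; simp [hU, pairs]
  | cons d1 t ih => intro d2; simp [hU, pairs, ih]

lemma hD_eq_any : ∀ (L : List Int) (d2 : Int),
    hD d2 L = (pairs (d2 :: L)).any (fun p => p.1 < p.2) := by
  intro L
  induction L with
  | nil => intro d2; simp [hD, pairs]
  | cons d1 t ih => intro d2; simp [hD, pairs, ih]


-- basic facts about adjacent pairs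
lemma pairs_cons_cons {α : Type} (a b : α) (t : List α) :
    pairs (a :: b :: t) = (a, b) :: pairs (b :: t) := rfl

lemma pairs_snoc {α : Type} : ∀ (l : List α) (x : α),
    pairs (l ++ [x]) = pairs l ++ (l.getLast?.map (fun y => (y, x))).toList := by
  intro l
  induction l with
  | nil => intro x; simp [pairs]
  | cons a l ih =>
    intro x
    cases l with
    | nil => simp [pairs]
    | cons b t =>
      have : (a :: b :: t) ++ [x] = a :: b :: (t ++ [x]) := by simp
      rw [this, pairs_cons_cons]
      rw [show b :: (t ++ [x]) = (b :: t) ++ [x] by simp, ih x, pairs_cons_cons]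
      simp

lemma pairs_reverse {α : Type} : ∀ (l : List α),
    pairs l.reverse = ((pairs l).map (fun p => (p.2, p.1))).reverse := by
  intro l
  induction l with
  | nil => simp [pairs]
  | cons a l ih =>
    rw [List.reverse_cons, pairs_snoc, ih, List.getLast?_reverse]
    cases l with
    | nil => simp [pairs]
    | cons b t => rw [pairs_cons_cons]; simp

lemma pairs_map {α β : Type} (h : α → β) (l : List α) :
    pairs (l.map h) = (pairs l).map (fun p => (h p.1, h p.2)) := by
  unfold pairs
  rw [show (List.map h l).drop 1 = (l.drop 1).map h from (List.map_drop ..).symm, List.zip_map]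
  simp [Prod.map]

-- the fold of B's loop computes the two `any`s
lemma altFlags_any : ∀ (ps : List (Char × Char)) (u v : Bool),
    ps.foldl (fun fl ab =>
      if ab.1 < ab.2 then (true, fl.2)
      else if ab.1 > ab.2 then (fl.1, true)
      else fl) (u, v)
    = (u || ps.any (fun p => p.1 < p.2), v || ps.any (fun p => p.2 < p.1)) := by
  intro ps
  induction ps with
  | nil => intro u v; simp
  | cons p t ih =>
    intro u v
    by_cases hl : p.1 < p.2
    · have hg : ¬ p.2 < p.1 := by exact lt_asymm hl
      simp [hl, hg, ih]
    · by_cases hg : p.2 < p.1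
      · simp [hl, hg, ih]
      · simp [hl, hg, ih]

lemma altFlags_eq (ps : List (Char × Char)) :
    altFlags ps = (ps.any (fun p => p.1 < p.2), ps.any (fun p => p.2 < p.1)) := by
  unfold altFlags
  rw [altFlags_any]
  simp

-- Nat.toDigits in terms of Nat.digits
lemma toDigitsCore_eq : ∀ (fuel m : Nat) (ds : List Char), 0 < m → m ≤ fuel →
    Nat.toDigitsCore 10 fuel m ds = ((Nat.digits 10 m).map Nat.digitChar).reverse ++ ds := by
  intro fuel
  induction fuel with
  | zero => intro m ds h1 h2; omega
  | succ f ih =>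
    intro m ds h1 h2
    by_cases hdv : m / 10 = 0
    · simp [Nat.toDigitsCore, hdv, Nat.digits_def' (by norm_num : 1 < 10) h1]
    · have h1' : 0 < m / 10 := Nat.pos_of_ne_zero hdv
      have h2' : m / 10 ≤ f := by
        have := Nat.div_lt_self h1 (by norm_num : 1 < 10); omega
      simp only [Nat.toDigitsCore, hdv]
      rw [ih _ _ h1' h2', Nat.digits_def' (by norm_num : 1 < 10) h1]
      simp

lemma toDigits_eq (m : Nat) (h : 0 < m) :
    Nat.toDigits 10 m = ((Nat.digits 10 m).map Nat.digitChar).reverse := by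
  unfold Nat.toDigits
  rw [toDigitsCore_eq (m + 1) m [] h (by omega)]
  simp

-- `any` respects pointwise equality on the list's members
lemma any_congr_of_mem {α : Type} {l : List α} {p q : α → Bool} (h : ∀ a ∈ l, p a = q a) :
    l.any p = l.any q := by
  induction l with
  | nil => rfl
  | cons a t ih => simp [List.any_cons, h a (by simp), ih (fun b hb => h b (by simp [hb]))]

-- digitChar preserves strict order on single digits
lemma digitChar_lt_iff (a b : Nat) (ha : a < 10) (hb : b < 10) :
    (Nat.digitChar a < Nat.digitChar b) ↔ a < b := by
  interval_cases a <;> interval_cases b <;> decide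

-- the common verdict table
def verdict (up down : Bool) : Int :=
  if up && down then 0 else if up then 1 else if down then 2 else 0

-- A in terms of the little-endian digit pairs
lemma detA_char (m : Nat) (hm : 0 < m) :
    determinar_orden (m : Int) =
      verdict ((pairs (Nat.digits 10 m)).any fun p => decide (p.2 < p.1))
              ((pairs (Nat.digits 10 m)).any fun p => decide (p.1 < p.2)) := by
  unfold determinar_orden
  rw [detLoopA_eq_goA m, goA_zero]
  have hmod : PySem.Int.mod (m : Int) 10 = ((m % 10 : Nat) : Int) := by
    exact_mod_cast PySem.Int.mod_natCast m 10
  have e1 : hU (PySem.Int.mod (m : Int) 10) ((Nat.digits 10 m).map (Nat.cast : Nat → Int))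
      = (pairs (Nat.digits 10 m)).any (fun p => decide (p.2 < p.1)) := by
    rw [hU_eq_any, hmod, Nat.digits_def' (by norm_num : 1 < 10) hm]
    rw [show ((m % 10 : Nat) : Int) :: List.map (Nat.cast : Nat → Int) (m % 10 :: Nat.digits 10 (m / 10))
          = List.map (Nat.cast : Nat → Int) (m % 10 :: m % 10 :: Nat.digits 10 (m / 10)) by simp]
    rw [pairs_map, pairs_cons_cons, List.any_map, List.any_cons]
    simp [Function.comp_def]
  have e2 : hD (PySem.Int.mod (m : Int) 10) ((Nat.digits 10 m).map (Nat.cast : Nat → Int))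
      = (pairs (Nat.digits 10 m)).any (fun p => decide (p.1 < p.2)) := by
    rw [hD_eq_any, hmod, Nat.digits_def' (by norm_num : 1 < 10) hm]
    rw [show ((m % 10 : Nat) : Int) :: List.map (Nat.cast : Nat → Int) (m % 10 :: Nat.digits 10 (m / 10))
          = List.map (Nat.cast : Nat → Int) (m % 10 :: m % 10 :: Nat.digits 10 (m / 10)) by simp]
    rw [pairs_map, pairs_cons_cons, List.any_map, List.any_cons]
    simp [Function.comp_def]
  rw [e1, e2]
  rfl

-- B in terms of the little-endian digit pairs
lemma altB_char (m : Nat) (hm : 0 < m) :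
    determinar_orden_alt (m : Int) =
      verdict ((pairs (Nat.digits 10 m)).any fun p => decide (p.2 < p.1))
              ((pairs (Nat.digits 10 m)).any fun p => decide (p.1 < p.2)) := by
  have hneg : ¬ ((m : Int) < 0) := by omega
  have hs : ((PySem.Int.toStr (m : Int)).toList) = (Nat.digits 10 m).reverse.map Nat.digitChar := by
    rw [PySem.Int.toList_toStr]
    simp only [PySem.Int.toChars, if_neg hneg, Int.toNat_natCast]
    rw [toDigits_eq m hm, List.map_reverse]
  unfold determinar_orden_alt verdict
  rw [if_neg hneg]
  simp only [hs]
  rw [show ∀ l : List Char, l.zip (l.drop 1) = pairs l from fun _ => rfl]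
  rw [pairs_map, altFlags_eq]
  have hb : ∀ p ∈ pairs (Nat.digits 10 m).reverse, p.1 < 10 ∧ p.2 < 10 := by
    intro p hp
    have h1 : p.1 ∈ (Nat.digits 10 m).reverse := (List.of_mem_zip hp).1
    have h2 : p.2 ∈ (Nat.digits 10 m).reverse := List.drop_subset _ _ (List.of_mem_zip hp).2
    exact ⟨Nat.digits_lt_base (by norm_num) (List.mem_reverse.mp h1),
           Nat.digits_lt_base (by norm_num) (List.mem_reverse.mp h2)⟩
  have hup : ((pairs (Nat.digits 10 m).reverse).map (fun p => (Nat.digitChar p.1, Nat.digitChar p.2))).any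
        (fun p => decide (p.1 < p.2))
      = (pairs (Nat.digits 10 m)).any (fun p => decide (p.2 < p.1)) := by
    rw [List.any_map]
    have h1 : ((pairs (Nat.digits 10 m).reverse).any
        ((fun p : Char × Char => decide (p.1 < p.2)) ∘ (fun p : Nat × Nat => (Nat.digitChar p.1, Nat.digitChar p.2))))
        = (pairs (Nat.digits 10 m).reverse).any (fun p => decide (p.1 < p.2)) :=
      any_congr_of_mem (fun p hp => by
        simp [digitChar_lt_iff p.1 p.2 (hb p hp).1 (hb p hp).2])
    rw [h1, pairs_reverse, List.any_reverse, List.any_map]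
    simp [Function.comp_def]
  have hdn : ((pairs (Nat.digits 10 m).reverse).map (fun p => (Nat.digitChar p.1, Nat.digitChar p.2))).any
        (fun p => decide (p.2 < p.1))
      = (pairs (Nat.digits 10 m)).any (fun p => decide (p.1 < p.2)) := by
    rw [List.any_map]
    have h1 : ((pairs (Nat.digits 10 m).reverse).any
        ((fun p : Char × Char => decide (p.2 < p.1)) ∘ (fun p : Nat × Nat => (Nat.digitChar p.1, Nat.digitChar p.2))))
        = (pairs (Nat.digits 10 m).reverse).any (fun p => decide (p.2 < p.1)) :=
      any_congr_of_mem (fun p hp => by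
        simp [digitChar_lt_iff p.2 p.1 (hb p hp).2 (hb p hp).1])
    rw [h1, pairs_reverse, List.any_reverse, List.any_map]
    simp [Function.comp_def]
  rw [hup, hdn]

-- ===== VERDICT (by name: the statement is the Claim_ definition above) =====
theorem determinar_orden_spec : Claim_equal_determinar_orden := by
  intro n _
  unfold Spec_determinar_orden
  rcases lt_trichotomy n 0 with h | h | h
  · unfold determinar_orden determinar_orden_alt
    rw [detLoopA, dif_neg (by omega : ¬ n > 0), if_pos h]
  · subst h
    unfold determinar_orden determinar_orden_alt
    rw [detLoopA]
    norm_num [PySem.Int.toList_toStr, PySem.Int.toChars, Nat.toDigits, Nat.toDigitsCore, altFlags]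
  · have hn : n = ((n.toNat : Nat) : Int) := (Int.toNat_of_nonneg (le_of_lt h)).symm
    rw [hn, detA_char n.toNat (by omega), altB_char n.toNat (by omega)]
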